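-- pv_equiv track=rewrite | github.com/MwendeS/Sori-Shinzaemon-assignment | 2.Sori-Shinzaemon-problem.py | compute_sorori_shinzaemon
-- ===== SOURCE A (Python) =====
-- def compute_sorori_shinzaemon(n_days=100):
--     """
--     Compute the rice grains received daily and in total,
--     based on Sorori Shinzaemon's exponential growth request.
--
--     Parameters
--     ----------
--     n_days : int
--         Number of days rice is given (default = 100)
--
--     Returns
--     -------
--     list_n_grains : list
--         Rice grains received each day
--     list_total_grains : list
--         Cumulative rice grains received up to that day
--     """
--     list_n_grains = []        # rice per day
--     list_total_grains = []    # cumulative rice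
--
--     total = 0
--     for day in range(n_days):
--         grains_today = 2 ** day   # exponential growth
--         total += grains_today
--         list_n_grains.append(grains_today)
--         list_total_grains.append(total)
--
--     return list_n_grains, list_total_grains
-- ===== SOURCE B (Python) =====
-- def compute_sorori_shinzaemon(n_days=100):
--     # Closed-form version: day d gives 2**d grains and the cumulative
--     # total after day d is the geometric sum 2**(d+1) - 1, so both lists
--     # are built directly from the index without a running accumulator.
--     daily = [2 ** d for d in range(n_days)]
--     total = [2 ** (d + 1) - 1 for d in range(n_days)]
--     return daily, total
-- ===== Notes on version B (the rewrite author's own statement) =====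
-- stated objective: simpler
-- what changed: The cumulative list is computed per index by the closed-form geometric-series sum in a comprehension, removing the stateful running total and the single append-loop.
import Mathlib
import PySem

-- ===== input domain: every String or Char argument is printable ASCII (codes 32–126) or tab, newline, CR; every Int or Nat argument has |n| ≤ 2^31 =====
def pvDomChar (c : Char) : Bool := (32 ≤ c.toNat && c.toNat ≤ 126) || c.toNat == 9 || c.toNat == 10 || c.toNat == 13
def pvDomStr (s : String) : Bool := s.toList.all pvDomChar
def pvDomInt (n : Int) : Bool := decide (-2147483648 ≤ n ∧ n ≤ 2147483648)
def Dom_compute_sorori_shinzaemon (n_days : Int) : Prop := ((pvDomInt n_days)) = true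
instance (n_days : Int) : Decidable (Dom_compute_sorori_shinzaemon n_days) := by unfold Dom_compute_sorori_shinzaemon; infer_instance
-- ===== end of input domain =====

-- B replaces the running-total accumulator by the closed form 2^(d+1)-1 per index (simpler).


-- ===== PORT A =====
-- loop over range(n_days) threading (list_n_grains, list_total_grains, total);
-- 2 ** day is exact as 2 ^ day.toNat since day ∈ range(n_days) is nonnegative
def compute_sorori_shinzaemon (n_days : Int) : List Int × List Int :=
  let st := (PySem.List.pyRange 0 n_days 1).foldl
    (fun (s : List Int × List Int × Int) day =>
      let grains_today : Int := 2 ^ day.toNat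
      let total := s.2.2 + grains_today
      (s.1 ++ [grains_today], s.2.1 ++ [total], total))
    ([], [], 0)
  (st.1, st.2.1)

-- ===== PORT B =====
-- two comprehensions over range(n_days); exponents are nonnegative there
def compute_sorori_shinzaemon_alt (n_days : Int) : List Int × List Int :=
  ((PySem.List.pyRange 0 n_days 1).map (fun d => (2 : Int) ^ d.toNat),
   (PySem.List.pyRange 0 n_days 1).map (fun d => (2 : Int) ^ (d + 1).toNat - 1))

-- ===== PRECONDITION & SPEC =====
def Spec_compute_sorori_shinzaemon (n_days : Int) (out : List Int × List Int) : Prop := out = compute_sorori_shinzaemon_alt n_days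
instance (n_days : Int) (out : List Int × List Int) : Decidable (Spec_compute_sorori_shinzaemon n_days out) := by unfold Spec_compute_sorori_shinzaemon; infer_instance

-- ===== CLAIM (what is proved, stated in full; the proofs are below) =====
def Claim_equal_compute_sorori_shinzaemon : Prop := ∀ (n_days : Int), Dom_compute_sorori_shinzaemon n_days → Spec_compute_sorori_shinzaemon n_days (compute_sorori_shinzaemon n_days)

-- ===== LEMMAS AND PROOFS =====

theorem sorori_foldl_range (m : Nat) :
    (List.range m).foldl
      (fun (s : List Int × List Int × Int) (k : Nat) =>
        (s.1 ++ [(2 : Int) ^ k], s.2.1 ++ [s.2.2 + 2 ^ k], s.2.2 + 2 ^ k))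
      ([], [], 0)
    = ((List.range m).map (fun k => (2 : Int) ^ k),
       (List.range m).map (fun k => (2 : Int) ^ (k + 1) - 1),
       2 ^ m - 1) := by
  induction m with
  | zero => simp
  | succ m ih =>
    rw [List.range_succ, List.foldl_append, ih]
    simp [List.map_append]
    ring

theorem compute_sorori_shinzaemon_spec : Claim_equal_compute_sorori_shinzaemon := by
  intro n _
  unfold Spec_compute_sorori_shinzaemon compute_sorori_shinzaemon compute_sorori_shinzaemon_alt
  rw [PySem.List.pyRange_one]
  simp only [List.foldl_map, List.map_map]
  have h0 : ∀ k : Nat, ((0 : Int) + (k : Int)).toNat = k := by intro k; omega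
  have h2 : ∀ k : Nat, ((0 : Int) + (k : Int) + 1).toNat = k + 1 := by intro k; omega
  simp only [h0]
  rw [sorori_foldl_range (n - 0).toNat]
  simp [Function.comp_def, h2, Int.toNat_natCast]
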